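-- pv_equiv track=rewrite | github.com/githubdudu/atcoder | advent_of_code/day21_p1.py | create_buttons
-- ===== SOURCE A (Python) =====
-- def create_buttons(password: str, script_map: dict) -> list[str]:
--     result = []
--     def create_buttons_helper(prev: str, password):
--         if len(password) == 1:
--             result.append(prev)
--             return
--
--         if password[0] == password[1]:
--             create_buttons_helper(prev+"A", password[1:])
--             return
--
--         tokens = script_map[(password[0], password[1])]
--         for token in tokens:
--             create_buttons_helper(prev+token+"A", password[1:])
--
--     create_buttons_helper("", "A" + password)
--     return result;
-- ===== SOURCE B (Python) =====
-- def create_buttons(password: str, script_map: dict) -> list[str]: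
--     s = "A" + password
--     option_lists = []
--     for a, b in zip(s, s[1:]):
--         if a == b:
--             option_lists.append(["A"])
--         else:
--             option_lists.append([token + "A" for token in script_map[(a, b)]])
--     result = [""]
--     for opts in reversed(option_lists):
--         result = [t + r for t in opts for r in result]
--     return result
-- ===== Notes on version B (the rewrite author's own statement) =====
-- stated objective: alternative
-- what changed: Replaces the recursive accumulator-passing DFS with a two-phase pass: build the per-position option table once, then expand it with an explicit back-to-front cartesian product.
-- outside the precondition, e.g. on create_buttons('BC', {('A', 'B'): []}): A returns [], B raises KeyError
import Mathlib
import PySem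

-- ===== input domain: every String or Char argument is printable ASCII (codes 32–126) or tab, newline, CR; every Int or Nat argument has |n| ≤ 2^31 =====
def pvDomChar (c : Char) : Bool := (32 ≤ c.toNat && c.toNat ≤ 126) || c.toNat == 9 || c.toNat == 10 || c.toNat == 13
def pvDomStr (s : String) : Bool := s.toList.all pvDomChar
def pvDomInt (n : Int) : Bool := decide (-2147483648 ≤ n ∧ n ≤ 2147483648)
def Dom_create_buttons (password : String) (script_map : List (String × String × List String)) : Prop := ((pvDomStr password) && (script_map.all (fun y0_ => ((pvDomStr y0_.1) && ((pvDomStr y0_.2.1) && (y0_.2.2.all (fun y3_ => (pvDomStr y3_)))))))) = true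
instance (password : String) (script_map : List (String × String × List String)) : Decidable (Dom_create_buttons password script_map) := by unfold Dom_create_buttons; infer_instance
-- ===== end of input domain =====

-- B replaces A's recursive DFS with a table of per-position option lists expanded by an
-- explicit back-to-front cartesian product (objective: alternative decomposition, same cost).

-- shared primitive: Python `script_map[(a, b)]` on the association list (first match; none = KeyError)
def smLookup (m : List (String × String × List String)) (a b : Char) : Option (List String) :=
  (m.find? (fun e => e.1 == a.toString && e.2.1 == b.toString)).map (fun e => e.2.2)

-- ===== PORT A =====
-- the nested `create_buttons_helper` (strings walked as List Char; `.getD []` is only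
-- reached with a `some` under Pre_, which excludes the KeyError inputs)
def cbHelper (m : List (String × String × List String)) (prev : String) (pw : List Char) :
    List String :=
  match pw with
  | [] => []                -- unreachable from the initial call "A" + password
  | [_] => [prev]
  | c1 :: c2 :: rest =>
    if c1 == c2 then cbHelper m (prev ++ "A") (c2 :: rest)
    else
      let tokens := (smLookup m c1 c2).getD []
      tokens.foldl (fun acc token => acc ++ cbHelper m (prev ++ token ++ "A") (c2 :: rest)) []
termination_by pw.length
decreasing_by all_goals simp

def create_buttons (password : String) (script_map : List (String × String × List String)) :
    List String :=
  cbHelper script_map "" ('A' :: password.toList)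

-- ===== PORT B =====
def create_buttons_alt (password : String) (script_map : List (String × String × List String)) :
    List String :=
  let s := 'A' :: password.toList
  let optionLists := (s.zip s.tail).map (fun p =>
    if p.1 == p.2 then ["A"]
    else ((smLookup script_map p.1 p.2).getD []).map (fun token => token ++ "A"))
  optionLists.reverse.foldl
    (fun res opts => opts.flatMap (fun t => res.map (fun r => t ++ r))) [""]

-- ===== PRECONDITION & SPEC =====
-- Pre_ excludes exactly the inputs where some adjacent unequal pair of "A"+password is missing
-- from script_map: there B raises KeyError, and A either raises KeyError or (when an earlier
-- empty token list kills every branch first) returns an accidental [] that B cannot reach.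
def Pre_create_buttons (password : String) (script_map : List (String × String × List String)) : Prop :=
  ∀ p ∈ ('A' :: password.toList).zip ('A' :: password.toList).tail,
    p.1 ≠ p.2 → (smLookup script_map p.1 p.2).isSome = true
instance (password : String) (script_map : List (String × String × List String)) : Decidable (Pre_create_buttons password script_map) := by unfold Pre_create_buttons; infer_instance

def pvWitness_create_buttons : String × (List (String × String × List String)) :=
  ("AB", [("A", "B", ["<", ">"])])

def Spec_create_buttons (password : String) (script_map : List (String × String × List String)) (out : List String) : Prop := out = create_buttons_alt password script_map
instance (password : String) (script_map : List (String × String × List String)) (out : List String) : Decidable (Spec_create_buttons password script_map out) := by unfold Spec_create_buttons; infer_instance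

-- ===== CLAIM (what is proved, stated in full; the proofs are below) =====
def Claim_equal_create_buttons : Prop := ∀ (password : String) (script_map : List (String × String × List String)), Dom_create_buttons password script_map → Pre_create_buttons password script_map → Spec_create_buttons password script_map (create_buttons password script_map)

-- ===== LEMMAS AND PROOFS =====

-- the table-then-product computation of B, as a function of the character list
def prodOf (m : List (String × String × List String)) (pw : List Char) : List String :=
  ((pw.zip pw.tail).map (fun p =>
      if p.1 == p.2 then ["A"]
      else ((smLookup m p.1 p.2).getD []).map (fun token => token ++ "A"))).foldr
    (fun opts res => opts.flatMap (fun t => res.map (fun r => t ++ r))) [""]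

lemma prodOf_single (m : List (String × String × List String)) (c : Char) :
    prodOf m [c] = [""] := rfl

lemma prodOf_cons (m : List (String × String × List String)) (c1 c2 : Char) (rest : List Char) :
    prodOf m (c1 :: c2 :: rest) =
      (if c1 == c2 then ["A"]
       else ((smLookup m c1 c2).getD []).map (fun token => token ++ "A")).flatMap
        (fun t => (prodOf m (c2 :: rest)).map (fun r => t ++ r)) := rfl

-- loop invariant: A's helper prefixes `prev` onto B's product of the suffix
lemma cbHelper_eq_prodOf (m : List (String × String × List String)) :
    ∀ (pw : List Char), pw ≠ [] →
      ∀ prev, cbHelper m prev pw = (prodOf m pw).map (fun r => prev ++ r) := by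
  intro pw
  induction pw with
  | nil => intro h; exact absurd rfl h
  | cons c1 tl ih =>
    cases tl with
    | nil =>
      intro _ prev
      simp [cbHelper, prodOf_single]
    | cons c2 rest =>
      intro _ prev
      rw [prodOf_cons]
      by_cases h : c1 = c2
      · simp only [cbHelper, h, beq_self_eq_true, if_true]
        rw [ih (by simp) (prev ++ "A")]
        simp [Function.comp, String.append_assoc]
      · have hb : (c1 == c2) = false := by simp [h]
        simp only [cbHelper, hb, Bool.false_eq_true, if_false]
        rw [PySem.List.foldl_append_eq_flatMap]
        simp only [List.nil_append, List.flatMap_map]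
        rw [List.map_flatMap]
        apply List.flatMap_congr
        intro token _
        rw [ih (by simp) (prev ++ token ++ "A")]
        simp [Function.comp, String.append_assoc]

-- ===== VERDICT (by name: the statement is the Claim_ definition above) =====
theorem create_buttons_spec : Claim_equal_create_buttons := by
  intro password script_map _ _
  unfold Spec_create_buttons create_buttons create_buttons_alt
  rw [List.foldl_reverse]
  rw [cbHelper_eq_prodOf script_map ('A' :: password.toList) (by simp) ""]
  have : (prodOf script_map ('A' :: password.toList)).map (fun r => "" ++ r)
       = prodOf script_map ('A' :: password.toList) := by
    simp [String.empty_append]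
  rw [this]
  rfl
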